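-- pv_equiv track=rewrite | github.com/dchalupnik/advent-of-code | 2023/12.py | count_valid_arrangements
-- ===== SOURCE A (Python) =====
-- import typing as tp
--
-- def count_valid_arrangements(combinations: tp.Generator[tp.List[bool], None, None], instruction: tp.List[int]):
--     valid_count = 0
--     for combination in combinations:
--         parsed_combination = []
--         current_number = 0
--         for it in combination:
--             if it:
--                 current_number += 1
--             elif current_number:
--                 parsed_combination.append(current_number)
--                 current_number = 0
--
--         if current_number:
--             parsed_combination.append(current_number)
--
--         if parsed_combination == instruction:
--             valid_count += 1
--
--     return valid_count
-- ===== SOURCE B (Python) =====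
-- def count_valid_arrangements(combinations, instruction):
--     valid_count = 0
--     for combination in combinations:
--         s = ''.join('#' if b else '.' for b in combination)
--         if [len(p) for p in s.split('.') if p] == instruction:
--             valid_count += 1
--     return valid_count
-- ===== Notes on version B (the rewrite author's own statement) =====
-- stated objective: simpler
-- what changed: B replaces A's manual transition-counting state machine (current_number accumulator with post-loop flush) by rendering each combination as a '#'/'.' string and reading the run lengths off split('.'), comparing that list to instruction.
import Mathlib
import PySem

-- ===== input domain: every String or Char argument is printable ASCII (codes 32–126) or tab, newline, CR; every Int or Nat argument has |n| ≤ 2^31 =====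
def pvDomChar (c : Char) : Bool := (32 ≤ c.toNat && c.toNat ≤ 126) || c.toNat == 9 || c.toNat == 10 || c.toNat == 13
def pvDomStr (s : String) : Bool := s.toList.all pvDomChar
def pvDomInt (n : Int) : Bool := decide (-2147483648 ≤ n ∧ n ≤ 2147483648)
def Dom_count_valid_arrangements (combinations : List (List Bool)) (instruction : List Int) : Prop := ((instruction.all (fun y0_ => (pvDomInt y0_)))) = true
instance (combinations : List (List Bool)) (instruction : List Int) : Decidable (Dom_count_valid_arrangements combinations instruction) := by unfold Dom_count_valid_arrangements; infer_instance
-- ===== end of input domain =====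

-- B replaces A's manual transition-counting state machine by rendering each combination as a
-- '#'/'.' string and reading the run lengths off split('.'); objective: simpler.

-- ===== PORT A =====
-- step of A's inner loop: state = (parsed_combination, current_number)
def pvAStep (st : List Int × Int) (it : Bool) : List Int × Int :=
  if it then (st.1, st.2 + 1)
  else if st.2 ≠ 0 then (st.1 ++ [st.2], 0)
  else st

def count_valid_arrangements (combinations : List (List Bool)) (instruction : List Int) : Int :=
  combinations.foldl
    (fun valid_count combination =>
      let st := combination.foldl pvAStep ([], 0)
      let parsed_combination := if st.2 ≠ 0 then st.1 ++ [st.2] else st.1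
      if parsed_combination = instruction then valid_count + 1 else valid_count)
    0

-- ===== PORT B =====
-- ''.join of single characters is ported as the List Char itself; s.split('.') is PySem.Chars.splitOn s ['.'] (exact)
def count_valid_arrangements_alt (combinations : List (List Bool)) (instruction : List Int) : Int :=
  combinations.foldl
    (fun valid_count combination =>
      let s : List Char := combination.map (fun b => if b then '#' else '.')
      let runs : List Int :=
        ((PySem.Chars.splitOn s ['.']).filter (fun p => !p.isEmpty)).map (fun p => (p.length : Int))
      if runs = instruction then valid_count + 1 else valid_count)
    0

-- ===== PRECONDITION & SPEC =====
def Spec_count_valid_arrangements (combinations : List (List Bool)) (instruction : List Int) (out : Int) : Prop := out = count_valid_arrangements_alt combinations instruction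
instance (combinations : List (List Bool)) (instruction : List Int) (out : Int) : Decidable (Spec_count_valid_arrangements combinations instruction out) := by unfold Spec_count_valid_arrangements; infer_instance

-- ===== CLAIM (what is proved, stated in full; the proofs are below) =====
def Claim_equal_count_valid_arrangements : Prop := ∀ (combinations : List (List Bool)) (instruction : List Int), Dom_count_valid_arrangements combinations instruction → Spec_count_valid_arrangements combinations instruction (count_valid_arrangements combinations instruction)

-- ===== LEMMAS AND PROOFS =====

-- run lengths of bs, given n pending '#'s already read (shared characterisation of both programs)
def runsAux : Int → List Bool → List Int
  | n, [] => if n ≠ 0 then [n] else []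
  | n, true :: bs => runsAux (n + 1) bs
  | n, false :: bs => if n ≠ 0 then n :: runsAux 0 bs else runsAux 0 bs

-- structural version of split on the single character '.'
def splitOnDot : List Char → List Char → List (List Char)
  | cur, [] => [cur]
  | cur, c :: rest => if c = '.' then cur :: splitOnDot [] rest else splitOnDot (cur ++ [c]) rest

theorem go_eq : ∀ (l : List Char) (fuel : Nat) (cur : List Char) (acc : List (List Char)),
    l.length < fuel →
    PySem.Chars.splitOn.go ['.'] fuel l cur acc = acc.reverse ++ splitOnDot cur.reverse l := by
  intro l
  induction l with
  | nil =>
    intro fuel cur acc h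
    match fuel, h with
    | fuel+1, _ => simp [PySem.Chars.splitOn.go, splitOnDot]
  | cons c rest ih =>
    intro fuel cur acc h
    match fuel, h with
    | fuel+1, h =>
      rw [PySem.Chars.splitOn.go]
      by_cases hc : c = '.'
      · subst hc
        simp only [List.isPrefixOf, List.length_cons] at h ⊢
        simp only [beq_self_eq_true, Bool.true_and, if_pos]
        have hd : List.drop (([] : List Char).length + 1) ('.' :: rest) = rest := by simp
        rw [hd, ih _ _ _ (by omega)]
        simp [splitOnDot]
      · have : (['.'].isPrefixOf (c :: rest)) = false := by
          simp [List.isPrefixOf]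
          exact fun hh => hc hh.symm
        rw [this]
        simp only [Bool.false_eq_true, if_neg, not_false_iff]
        rw [ih _ _ _ (by simp at h ⊢; omega)]
        simp [splitOnDot, hc]

theorem splitOn_eq (s : List Char) : PySem.Chars.splitOn s ['.'] = splitOnDot [] s := by
  show PySem.Chars.splitOn.go ['.'] (s.length + 1) s [] [] = _
  rw [go_eq s (s.length + 1) [] [] (by omega)]
  rfl

-- A's inner loop flushed equals runsAux
theorem aLoop_eq : ∀ (bs : List Bool) (acc : List Int) (n : Int),
    (let st := bs.foldl pvAStep (acc, n)
     if st.2 ≠ 0 then st.1 ++ [st.2] else st.1) = acc ++ runsAux n bs := by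
  intro bs
  induction bs with
  | nil =>
    intro acc n
    by_cases h : n = 0 <;> simp [runsAux, h]
  | cons b bs ih =>
    intro acc n
    cases b with
    | true => simpa [pvAStep, runsAux] using ih acc (n + 1)
    | false =>
      by_cases h : n = 0
      · simpa [pvAStep, runsAux, h] using ih acc 0
      · rw [runsAux]
        simp only [h, ne_eq, not_false_eq_true, if_pos]
        rw [List.foldl_cons]
        simp only [pvAStep, Bool.false_eq_true, if_false, ne_eq, h, not_false_eq_true, if_pos]
        rw [ih (acc ++ [n]) 0]
        simp

-- B's split-based run lengths, with k pending '#'s, equal runsAux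
theorem bRuns_eq : ∀ (bs : List Bool) (k : Nat),
    ((splitOnDot (List.replicate k '#') (bs.map (fun b => if b then '#' else '.'))).filter
        (fun p => !p.isEmpty)).map (fun p => (p.length : Int)) = runsAux (k : Int) bs := by
  intro bs
  induction bs with
  | nil =>
    intro k
    cases k with
    | zero => simp [splitOnDot, runsAux]
    | succ k =>
      have h : ((k : Int) + 1) ≠ 0 := by omega
      simp [splitOnDot, runsAux, h]
  | cons b bs ih =>
    intro k
    cases b with
    | true =>
      have h1 : List.map (fun b => if b = true then '#' else '.') (true :: bs)
          = '#' :: List.map (fun b => if b = true then '#' else '.') bs := rfl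
      rw [h1, splitOnDot, if_neg (by decide), ← List.replicate_succ', ih (k + 1), runsAux]
      push_cast
      rfl
    | false =>
      have h1 : List.map (fun b => if b = true then '#' else '.') (false :: bs)
          = '.' :: List.map (fun b => if b = true then '#' else '.') bs := rfl
      rw [h1, splitOnDot, if_pos rfl, List.filter_cons]
      have ih0 := ih 0
      simp only [List.replicate_zero, Nat.cast_zero] at ih0
      cases k with
      | zero =>
        simp only [List.replicate_zero, List.isEmpty_nil, Bool.not_true, Bool.false_eq_true,
          if_false, ih0, runsAux]
        simp
      | succ k =>
        have hne : (!(List.replicate (k + 1) '#').isEmpty) = true := by simp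
        rw [if_pos hne, List.map_cons, ih0, runsAux]
        have h : ((k : Int) + 1) ≠ 0 := by omega
        push_cast
        simp [h]

-- per-combination: A's parsed list equals B's run-length list
theorem perComb (c : List Bool) :
    (let st := c.foldl pvAStep (([] : List Int), (0 : Int))
     if st.2 ≠ 0 then st.1 ++ [st.2] else st.1)
      = ((PySem.Chars.splitOn (c.map (fun b => if b then '#' else '.')) ['.']).filter
          (fun p => !p.isEmpty)).map (fun p => (p.length : Int)) := by
  rw [aLoop_eq c [] 0, splitOn_eq]
  rw [show ([] : List Char) = List.replicate 0 '#' from rfl, bRuns_eq c 0]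
  rfl

theorem outer_eq (instruction : List Int) : ∀ (combinations : List (List Bool)) (acc : Int),
    combinations.foldl
      (fun valid_count combination =>
        let st := combination.foldl pvAStep ([], 0)
        let parsed_combination := if st.2 ≠ 0 then st.1 ++ [st.2] else st.1
        if parsed_combination = instruction then valid_count + 1 else valid_count) acc
    = combinations.foldl
      (fun valid_count combination =>
        let s : List Char := combination.map (fun b => if b then '#' else '.')
        let runs : List Int :=
          ((PySem.Chars.splitOn s ['.']).filter (fun p => !p.isEmpty)).map (fun p => (p.length : Int))
        if runs = instruction then valid_count + 1 else valid_count) acc := by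
  intro combinations
  induction combinations with
  | nil => intro acc; rfl
  | cons c cs ih =>
    intro acc
    simp only [List.foldl_cons]
    rw [show (let st := c.foldl pvAStep (([] : List Int), (0 : Int))
              let parsed_combination := if st.2 ≠ 0 then st.1 ++ [st.2] else st.1
              if parsed_combination = instruction then acc + 1 else acc)
           = (let s : List Char := c.map (fun b => if b then '#' else '.')
              let runs : List Int :=
                ((PySem.Chars.splitOn s ['.']).filter (fun p => !p.isEmpty)).map
                  (fun p => (p.length : Int))
              if runs = instruction then acc + 1 else acc) from by
          simp only []
          rw [perComb c]]
    exact ih _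

-- ===== VERDICT (by name: the statement is the Claim_ definition above) =====
theorem count_valid_arrangements_spec : Claim_equal_count_valid_arrangements := by
  intro combinations instruction _
  unfold Spec_count_valid_arrangements count_valid_arrangements count_valid_arrangements_alt
  exact outer_eq instruction combinations 0
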